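-- pv_equiv track=rewrite | github.com/amalthomas2003/NPTEL | DSA_using_Python/Week4.py | transcript
-- ===== SOURCE A (Python) =====
-- def transcript(coursedetails, studentdetails, grades):
--     course_map = {code: name for code, name in coursedetails}
--     student_map = {roll: name for roll, name in studentdetails}
--     student_grades = {}
--     for roll, code, grade in grades:
--         if roll not in student_grades:
--             student_grades[roll] = []
--         student_grades[roll].append((code, course_map[code], grade))
--     transcript_list = []
--     for roll in sorted(student_grades.keys()):
--         name = student_map[roll]
--         sorted_grades = sorted(student_grades[roll], key=lambda x: x[0])
--         transcript_list.append((roll, name, sorted_grades))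
--
--     return transcript_list
-- ===== SOURCE B (Python) =====
-- def transcript(coursedetails, studentdetails, grades):
--     course_map = dict(coursedetails)
--     student_map = dict(studentdetails)
--     by_code = sorted(grades, key=lambda g: g[1])
--     rolls = sorted({r for r, _, _ in grades})
--     return [
--         (roll,
--          student_map[roll],
--          [(code, course_map[code], grade)
--           for r, code, grade in by_code if r == roll])
--         for roll in rolls
--     ]
-- ===== Notes on version B (the rewrite author's own statement) =====
-- stated objective: alternative
-- what changed: Replaces A's dict-of-lists grouping plus a separate per-group sort with one global stable sort of all grades by course code, a sorted set of rolls, and a per-roll filter over the pre-sorted list (relying on stable-sort/filter commutation).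
import Mathlib
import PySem

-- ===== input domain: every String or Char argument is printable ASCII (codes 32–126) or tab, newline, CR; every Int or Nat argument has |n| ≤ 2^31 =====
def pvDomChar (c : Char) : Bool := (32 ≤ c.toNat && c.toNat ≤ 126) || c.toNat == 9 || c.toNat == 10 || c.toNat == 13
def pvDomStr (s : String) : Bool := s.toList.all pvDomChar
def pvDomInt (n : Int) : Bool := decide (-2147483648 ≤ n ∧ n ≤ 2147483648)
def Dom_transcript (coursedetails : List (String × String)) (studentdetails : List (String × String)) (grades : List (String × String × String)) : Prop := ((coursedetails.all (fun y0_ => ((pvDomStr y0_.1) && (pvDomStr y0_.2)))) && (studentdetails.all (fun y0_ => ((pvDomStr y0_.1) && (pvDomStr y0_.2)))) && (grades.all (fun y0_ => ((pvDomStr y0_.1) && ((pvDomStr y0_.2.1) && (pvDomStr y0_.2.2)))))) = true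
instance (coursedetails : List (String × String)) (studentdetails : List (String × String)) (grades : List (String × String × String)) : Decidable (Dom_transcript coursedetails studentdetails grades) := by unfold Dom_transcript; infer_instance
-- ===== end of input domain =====

-- B replaces A's dict-grouping + per-group sort by one global stable sort by course code,
-- a sorted set of rolls, and a per-roll filter over the pre-sorted list (objective: alternative decomposition).
-- B replaces A's dict-grouping + per-group sort by one global stable sort by course code,
-- a sorted set of rolls, and a per-roll filter over the pre-sorted list (objective: alternative decomposition).
-- ===== PORT A =====
-- the tuple A appends for one grade row: (code, course_map[code], grade);
-- course_map[code] raises KeyError on a missing code — Pre_transcript excludes those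
-- inputs, so the total form getD is exact on the claimed domain.
def pvF (cm : PySem.Dict String String) (g : String × String × String) : String × String × String :=
  (g.2.1, cm.getD g.2.1 "", g.2.2)

-- the body of A's grouping loop: "if roll not in sg: sg[roll] = []; sg[roll].append(...)"
def pvGroupStep (cm : PySem.Dict String String)
    (d : PySem.Dict String (List (String × String × String))) (g : String × String × String) :
    PySem.Dict String (List (String × String × String)) :=
  let d' := if d.contains g.1 then d else d.insert g.1 []
  d'.modify g.1 [] (fun l => l ++ [pvF cm g])

def transcript (coursedetails : List (String × String)) (studentdetails : List (String × String)) (grades : List (String × String × String)) : List (String × String × (List (String × String × String))) :=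
  let course_map : PySem.Dict String String := PySem.Dict.ofList coursedetails
  let student_map : PySem.Dict String String := PySem.Dict.ofList studentdetails
  let student_grades := grades.foldl (pvGroupStep course_map) PySem.Dict.empty
  (PySem.List.sorted student_grades.keys (fun x => x) false).foldl
    (fun acc roll =>
      acc ++ [(roll, student_map.getD roll "",
               PySem.List.sorted (student_grades.getD roll []) (fun x => x.1) false)]) []

-- ===== PORT B =====
def transcript_alt (coursedetails : List (String × String)) (studentdetails : List (String × String)) (grades : List (String × String × String)) : List (String × String × (List (String × String × String))) :=
  let course_map : PySem.Dict String String := PySem.Dict.ofList coursedetails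
  let student_map : PySem.Dict String String := PySem.Dict.ofList studentdetails
  let by_code := PySem.List.sorted grades (fun g => g.2.1) false
  let rolls := PySem.List.sorted (PySem.Set.ofList (grades.map (fun g => g.1))) (fun x => x) false
  rolls.map (fun roll =>
    (roll, student_map.getD roll "",
     (by_code.filter (fun g => g.1 == roll)).map
       (fun g => (g.2.1, course_map.getD g.2.1 "", g.2.2))))

-- ===== PRECONDITION & SPEC =====
-- Pre_ excludes exactly the inputs where Python A raises KeyError: a grade whose course code
-- is not in coursedetails or whose roll is not in studentdetails.
def Pre_transcript (coursedetails : List (String × String)) (studentdetails : List (String × String)) (grades : List (String × String × String)) : Prop :=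
  ∀ g ∈ grades, g.2.1 ∈ coursedetails.map Prod.fst ∧ g.1 ∈ studentdetails.map Prod.fst
instance (coursedetails : List (String × String)) (studentdetails : List (String × String)) (grades : List (String × String × String)) : Decidable (Pre_transcript coursedetails studentdetails grades) := by unfold Pre_transcript; infer_instance

def pvWitness_transcript : (List (String × String)) × (List (String × String)) × (List (String × String × String)) :=
  ([("C1", "Math")], [("R1", "Ann")], [("R1", "C1", "A")])

def Spec_transcript (coursedetails : List (String × String)) (studentdetails : List (String × String)) (grades : List (String × String × String)) (out : List (String × String × (List (String × String × String)))) : Prop := out = transcript_alt coursedetails studentdetails grades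
instance (coursedetails : List (String × String)) (studentdetails : List (String × String)) (grades : List (String × String × String)) (out : List (String × String × (List (String × String × String)))) : Decidable (Spec_transcript coursedetails studentdetails grades out) := by unfold Spec_transcript; infer_instance

-- ===== CLAIM (what is proved, stated in full; the proofs are below) =====
def Claim_equal_transcript : Prop := ∀ (coursedetails : List (String × String)) (studentdetails : List (String × String)) (grades : List (String × String × String)), Dom_transcript coursedetails studentdetails grades → Pre_transcript coursedetails studentdetails grades → Spec_transcript coursedetails studentdetails grades (transcript coursedetails studentdetails grades)

-- ===== LEMMAS AND PROOFS =====

-- (a) contents of one group of A's grouping fold: the grades of roll c, in input order, mapped by pvF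
theorem pvGetD_fold (cm : PySem.Dict String String) (gs : List (String × String × String))
    (d : PySem.Dict String (List (String × String × String))) (c : String) :
    (gs.foldl (pvGroupStep cm) d).getD c []
      = d.getD c [] ++ (gs.filter (fun g => g.1 == c)).map (pvF cm) := by
  induction gs generalizing d with
  | nil => simp
  | cons g gs ih =>
    rw [List.foldl_cons, ih]
    have hstep : (pvGroupStep cm d g).getD c []
        = if g.1 == c then d.getD c [] ++ [pvF cm g] else d.getD c [] := by
      unfold pvGroupStep
      by_cases h : d.contains g.1 = true
      · rw [if_pos h, PySem.Dict.getD_modify]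
        by_cases hc : c = g.1
        · subst hc; simp
        · have hbc : (g.1 == c) = false := beq_eq_false_iff_ne.mpr (fun e => hc e.symm)
          rw [if_neg hc, hbc]
          simp
      · rw [if_neg h, PySem.Dict.getD_modify]
        by_cases hc : c = g.1
        · subst hc
          rw [if_pos rfl, PySem.Dict.getD_insert_self,
              PySem.Dict.getD_of_not_contains d _ (eq_false_of_ne_true h)]
          simp
        · have hbc : (g.1 == c) = false := beq_eq_false_iff_ne.mpr (fun e => hc e.symm)
          rw [if_neg hc, PySem.Dict.getD_insert, if_neg hc, hbc]
          simp
    rw [hstep, List.filter_cons]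
    by_cases hc : (g.1 == c) = true <;> simp [hc]

-- (b) keys of A's grouping fold: the rolls, first occurrences in order
theorem pvKeys_fold (cm : PySem.Dict String String) (gs : List (String × String × String))
    (d : PySem.Dict String (List (String × String × String))) :
    (gs.foldl (pvGroupStep cm) d).keys = PySem.Set.update d.keys (gs.map (fun g => g.1)) := by
  induction gs generalizing d with
  | nil => simp [PySem.Set.update]
  | cons g gs ih =>
    rw [List.foldl_cons, ih]
    have hstep : (pvGroupStep cm d g).keys = PySem.Set.add d.keys g.1 := by
      unfold pvGroupStep PySem.Set.add
      have hmem : PySem.Set.contains d.keys g.1 = d.contains g.1 := by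
        rw [PySem.Dict.contains_eq_decide_mem_keys]
        simp [PySem.Set.contains]
      by_cases h : d.contains g.1 = true
      · rw [if_pos h]
        simp only [PySem.Dict.modify, PySem.Dict.keys_insert_of_contains d _ h]
        rw [hmem, if_pos h]
      · rw [if_neg h]
        simp only [PySem.Dict.modify, PySem.Dict.insert_insert_self]
        rw [PySem.Dict.keys_insert_of_not_contains d _ (eq_false_of_ne_true h)]
        rw [hmem, if_neg h]
    rw [hstep]
    rfl

-- insertBy places x in front when it precedes every element
theorem pvInsertBy_all_before {α : Type} (before : α → α → Bool) (x : α) (l : List α)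
    (h : ∀ z ∈ l, before x z = true) :
    PySem.List.insertBy before x l = x :: l := by
  cases l with
  | nil => simp [PySem.List.insertBy]
  | cons y ys => simp [PySem.List.insertBy, h y (by simp)]

-- insertBy preserves sortedness of the accumulator
theorem pvPairwise_insertBy {α : Type} (key : α → String) (x : α) (ys : List α)
    (h : ys.Pairwise (fun a b => key a ≤ key b)) :
    (PySem.List.insertBy (fun a b => decide (key a < key b)) x ys).Pairwise
      (fun a b => key a ≤ key b) := by
  induction ys with
  | nil => simp [PySem.List.insertBy]
  | cons y ys ih =>
    rcases List.pairwise_cons.mp h with ⟨hy, hys⟩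
    by_cases hb : key x < key y
    · simp only [PySem.List.insertBy, hb, decide_true, if_true]
      refine List.pairwise_cons.mpr ⟨?_, h⟩
      intro z hz
      rcases List.mem_cons.mp hz with rfl | hz
      · exact le_of_lt hb
      · exact le_of_lt (lt_of_lt_of_le hb (hy z hz))
    · simp only [PySem.List.insertBy, decide_eq_false hb, Bool.false_eq_true, if_false]
      refine List.pairwise_cons.mpr ⟨?_, ih hys⟩
      intro z hz
      rcases (PySem.List.mem_insertBy _ _ _ _).mp hz with hz | hz
      · exact hz ▸ le_of_not_gt hb
      · exact hy z hz

-- filter commutes with one stable insertion (kept element)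
theorem pvFilter_insertBy_pos {α : Type} (key : α → String) (p : α → Bool) (x : α) (ys : List α)
    (hys : ys.Pairwise (fun a b => key a ≤ key b)) (hx : p x = true) :
    (PySem.List.insertBy (fun a b => decide (key a < key b)) x ys).filter p
      = PySem.List.insertBy (fun a b => decide (key a < key b)) x (ys.filter p) := by
  induction ys with
  | nil => simp [PySem.List.insertBy, hx]
  | cons y ys ih =>
    rcases List.pairwise_cons.mp hys with ⟨hy, hys'⟩
    by_cases hb : key x < key y
    · have hbt : (decide (key x < key y)) = true := decide_eq_true hb
      simp only [PySem.List.insertBy, hbt, if_true]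
      rw [List.filter_cons, List.filter_cons]
      by_cases hpy : p y = true
      · simp only [hpy, if_true, hx]
        rw [pvInsertBy_all_before _ x (y :: List.filter p ys)]
        intro z hz
        rcases List.mem_cons.mp hz with rfl | hz
        · exact hbt
        · rcases List.mem_filter.mp hz with ⟨hz, _⟩
          exact decide_eq_true (lt_of_lt_of_le hb (hy z hz))
      · simp only [eq_false_of_ne_true hpy, Bool.false_eq_true, if_false, hx, if_true]
        rw [pvInsertBy_all_before]
        intro z hz
        rcases List.mem_filter.mp hz with ⟨hz, _⟩
        exact decide_eq_true (lt_of_lt_of_le hb (hy z hz))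
    · have hbf : (decide (key x < key y)) = false := decide_eq_false hb
      simp only [PySem.List.insertBy, hbf, Bool.false_eq_true, if_false]
      rw [List.filter_cons, List.filter_cons]
      by_cases hpy : p y = true
      · simp only [hpy, if_true]
        simp only [PySem.List.insertBy, hbf, Bool.false_eq_true, if_false]
        rw [ih hys']
      · simp only [eq_false_of_ne_true hpy, Bool.false_eq_true, if_false]
        exact ih hys'

-- filter commutes with one stable insertion (dropped element)
theorem pvFilter_insertBy_neg {α : Type} (before : α → α → Bool) (p : α → Bool) (x : α) (ys : List α)
    (hx : p x = false) :
    (PySem.List.insertBy before x ys).filter p = ys.filter p := by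
  induction ys with
  | nil => simp [PySem.List.insertBy, hx]
  | cons y ys ih =>
    by_cases hb : before x y = true
    · simp [PySem.List.insertBy, hb, List.filter_cons, hx]
    · simp only [PySem.List.insertBy, eq_false_of_ne_true hb, Bool.false_eq_true, if_false]
      rw [List.filter_cons, List.filter_cons, ih]

-- filter commutes with the whole stable sort (stability!)
theorem pvFilter_sorted_aux {α : Type} (key : α → String) (p : α → Bool) (l : List α)
    (acc : List α) (hacc : acc.Pairwise (fun a b => key a ≤ key b)) :
    (l.foldl (fun acc x => PySem.List.insertBy (fun a b => decide (key a < key b)) x acc) acc).filter p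
      = (l.filter p).foldl (fun acc x => PySem.List.insertBy (fun a b => decide (key a < key b)) x acc) (acc.filter p) := by
  induction l generalizing acc with
  | nil => rfl
  | cons g l ih =>
    rw [List.foldl_cons, ih _ (pvPairwise_insertBy key g acc hacc), List.filter_cons]
    by_cases hp : p g = true
    · rw [pvFilter_insertBy_pos key p g acc hacc hp]
      simp [hp]
    · rw [pvFilter_insertBy_neg _ p g acc (eq_false_of_ne_true hp)]
      simp [hp]

theorem pvFilter_sorted {α : Type} (key : α → String) (p : α → Bool) (l : List α) :
    PySem.List.sorted (l.filter p) key false = (PySem.List.sorted l key false).filter p := by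
  rw [PySem.List.sorted_eq_foldl_insertBy, PySem.List.sorted_eq_foldl_insertBy,
      pvFilter_sorted_aux key p l [] List.Pairwise.nil]
  rfl

-- one stable insertion of a mapped element into a mapped list
theorem pvInsertBy_map {α β : Type} (f : α → β) (keyb : β → String) (x : α) (ys : List α) :
    PySem.List.insertBy (fun a b => decide (keyb a < keyb b)) (f x) (ys.map f)
      = (PySem.List.insertBy (fun a b => decide (keyb (f a) < keyb (f b))) x ys).map f := by
  induction ys with
  | nil => simp [PySem.List.insertBy]
  | cons y ys ih =>
    by_cases hb : keyb (f x) < keyb (f y)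
    · have hbt : (decide (keyb (f x) < keyb (f y))) = true := decide_eq_true hb
      simp only [List.map_cons, PySem.List.insertBy, hbt, if_true, List.map]
    · have hbf : (decide (keyb (f x) < keyb (f y))) = false := decide_eq_false hb
      simp only [List.map_cons, PySem.List.insertBy, hbf, Bool.false_eq_true,
        if_false, List.map]
      rw [ih]

-- sorting a mapped list whose key factors through the map
theorem pvSorted_map {α β : Type} (f : α → β) (keyb : β → String) (l : List α) :
    PySem.List.sorted (l.map f) keyb false
      = (PySem.List.sorted l (fun a => keyb (f a)) false).map f := by
  rw [PySem.List.sorted_eq_foldl_insertBy, PySem.List.sorted_eq_foldl_insertBy, List.foldl_map]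
  suffices h : ∀ acc : List α,
      (l.foldl (fun acc x => PySem.List.insertBy (fun a b => decide (keyb a < keyb b)) (f x) acc) (acc.map f))
        = (l.foldl (fun acc x => PySem.List.insertBy (fun a b => decide (keyb (f a) < keyb (f b))) x acc) acc).map f by
    simpa using h []
  induction l with
  | nil => intro acc; rfl
  | cons g l ih =>
    intro acc
    rw [List.foldl_cons, List.foldl_cons, pvInsertBy_map f keyb g acc, ih]

-- ===== VERDICT (by name: the statement is the Claim_ definition above) =====
theorem transcript_spec : Claim_equal_transcript := by
  intro cd sd gs _ _
  show transcript cd sd gs = transcript_alt cd sd gs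
  simp only [transcript, transcript_alt]
  rw [PySem.List.foldl_append_singleton_eq_map, List.nil_append]
  rw [pvKeys_fold, PySem.Dict.keys_empty, PySem.Set.update_nil_left]
  refine List.map_congr_left ?_
  intro roll _
  refine congrArg (fun z => (roll, (PySem.Dict.ofList sd).getD roll "", z)) ?_
  rw [pvGetD_fold, PySem.Dict.getD_empty, List.nil_append]
  rw [pvSorted_map (pvF (PySem.Dict.ofList cd)) (fun x => x.1)]
  rw [show (fun a : String × String × String => (pvF (PySem.Dict.ofList cd) a).1)
        = (fun g : String × String × String => g.2.1) from rfl]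
  rw [pvFilter_sorted]
  exact List.map_congr_left (fun g _ => rfl)
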